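-- pv_equiv track=rewrite | github.com/Aarya-upadhyay/HackwithInfy_2026 | testad01/marc's cakewalk.py | marcsCakewalk
-- ===== SOURCE A (Python) =====
-- def marcsCakewalk(calorie):
--     # Write your code here
--     calorie.sort(reverse=True)
--     j=0
--     total_cal=0
--     for i in range(len(calorie)):
--         total_cal+=(2**j)*calorie[i]
--         j+=1
--     return total_cal
-- ===== SOURCE B (Python) =====
-- def marcsCakewalk(calorie):
--     # Selection algorithm: no sort at all; repeatedly extract the current
--     # maximum from the remaining items, doubling its weight each round.
--     # (Unlike A, this does not mutate the argument list.)
--     remaining = list(calorie)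
--     total = 0
--     weight = 1
--     while remaining:
--         m = max(remaining)
--         remaining.remove(m)
--         total += weight * m
--         weight *= 2
--     return total
-- ===== Notes on version B (the rewrite author's own statement) =====
-- stated objective: alternative
-- what changed: Replaces sort-then-weighted-sum by a selection algorithm: no sorting at all; B repeatedly extracts the current maximum from the remaining elements, doubling the weight each round; correct because the max-extraction order is exactly the descending order A sums over.
import Mathlib
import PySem

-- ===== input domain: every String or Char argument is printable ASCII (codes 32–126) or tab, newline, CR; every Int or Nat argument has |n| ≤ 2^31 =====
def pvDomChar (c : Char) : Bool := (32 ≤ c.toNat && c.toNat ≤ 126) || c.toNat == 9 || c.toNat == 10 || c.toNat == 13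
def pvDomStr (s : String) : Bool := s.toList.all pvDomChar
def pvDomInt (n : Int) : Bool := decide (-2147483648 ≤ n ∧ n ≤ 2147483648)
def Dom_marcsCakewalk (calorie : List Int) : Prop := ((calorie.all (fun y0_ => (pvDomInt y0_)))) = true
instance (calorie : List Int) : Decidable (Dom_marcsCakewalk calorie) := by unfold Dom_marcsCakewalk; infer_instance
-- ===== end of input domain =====

-- B replaces A's sort-then-weighted-sum by a selection algorithm (repeated max
-- extraction with doubling weight, no sort); objective: alternative. A sorts the
-- argument in place, B does not mutate it: the equivalence proved here is about
-- the return value only.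

-- ===== PORT A =====
def marcsCakewalk (calorie : List Int) : Int :=
  let cal := PySem.List.sorted calorie id true
  let s := (PySem.List.pyRange 0 (cal.length : Int) 1).foldl
    (fun (s : Int × Int) i => (s.1 + 1, s.2 + 2 ^ s.1.toNat * PySem.List.pyGetD cal i 0)) (0, 0)
  s.2

-- ===== PORT B =====
-- termination helper for the while loop of Source B: removing the max shortens the list
theorem pv_rem_len (x : Int) (xs : List Int) :
    ((PySem.List.remove? (x :: xs) ((PySem.List.max? (x :: xs) (fun y => y)).getD 0)).getD []).length
      < (x :: xs).length := by
  have hmax : PySem.List.max? (x :: xs) (fun y => y) = some (xs.foldl max x) :=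
    PySem.List.max?_id_cons x xs
  have hmem : xs.foldl max x ∈ (x :: xs) := PySem.List.max?_mem hmax
  rw [hmax]
  simp only [Option.getD_some]
  rw [PySem.List.remove?_eq_some_erase _ _ hmem]
  simp only [Option.getD_some]
  have := List.length_erase_of_mem hmem
  simp [this]

-- the while loop of Source B: state (remaining, total, weight)
def pvAltGo : List Int → Int → Int → Int
  | [], total, _ => total
  | x :: xs, total, weight =>
    let m := (PySem.List.max? (x :: xs) (fun y => y)).getD 0
    let rem := (PySem.List.remove? (x :: xs) m).getD []
    pvAltGo rem (total + weight * m) (weight * 2)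
termination_by l _ _ => l.length
decreasing_by exact pv_rem_len x xs

def marcsCakewalk_alt (calorie : List Int) : Int :=
  pvAltGo calorie 0 1

-- ===== PRECONDITION & SPEC =====
def Spec_marcsCakewalk (calorie : List Int) (out : Int) : Prop := out = marcsCakewalk_alt calorie
instance (calorie : List Int) (out : Int) : Decidable (Spec_marcsCakewalk calorie out) := by unfold Spec_marcsCakewalk; infer_instance

-- ===== CLAIM (what is proved, stated in full; the proofs are below) =====
def Claim_equal_marcsCakewalk : Prop := ∀ (calorie : List Int), Dom_marcsCakewalk calorie → Spec_marcsCakewalk calorie (marcsCakewalk calorie)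

-- ===== LEMMAS AND PROOFS =====

-- Horner value of a list: x0 + 2*x1 + 4*x2 + …
def pvHorner : List Int → Int
  | [] => 0
  | x :: xs => x + 2 * pvHorner xs

-- A's fold with state (j, total) equals total + 2^j * (reverse Horner fold)
theorem pv_horner (l : List Int) : ∀ (j : Nat) (t : Int),
    (l.foldl (fun (s : Int × Int) x => (s.1 + 1, s.2 + 2 ^ s.1.toNat * x)) ((j : Int), t)).2
      = t + 2 ^ j * l.reverse.foldl (fun a c => 2 * a + c) 0 := by
  induction l with
  | nil => intro j t; simp
  | cons x xs ih =>
    intro j t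
    have h1 : ((j : Int) + 1) = ((j + 1 : Nat) : Int) := by push_cast; ring
    have h2 : ((j : Int)).toNat = j := Int.toNat_natCast j
    have hrev : (x :: xs).reverse.foldl (fun a c => 2 * a + c) 0
        = 2 * xs.reverse.foldl (fun a c => 2 * a + c) 0 + x := by
      simp [List.reverse_cons, List.foldl_append]
    simp only [List.foldl_cons, h2, h1, hrev]
    rw [ih (j + 1)]
    ring

theorem pv_revfold (l : List Int) :
    l.reverse.foldl (fun a c => 2 * a + c) 0 = pvHorner l := by
  induction l with
  | nil => simp [pvHorner]
  | cons x xs ih =>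
    simp [List.reverse_cons, List.foldl_append, ih, pvHorner]
    ring

-- the maximum value is permutation-invariant
theorem pv_max_eq {l l' : List Int} (h : l.Perm l') {m m' : Int}
    (h1 : PySem.List.max? l (fun y => y) = some m)
    (h2 : PySem.List.max? l' (fun y => y) = some m') : m = m' := by
  have hm : m ∈ l := PySem.List.max?_mem h1
  have hm' : m' ∈ l' := PySem.List.max?_mem h2
  have a1 := PySem.List.max?_isMax h2 m ((h.mem_iff).1 hm)
  have a2 := PySem.List.max?_isMax h1 m' ((h.mem_iff).2 hm')
  exact le_antisymm a1 a2

-- the B loop is permutation-invariant (max and erase-of-max are)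
theorem pv_altGo_perm : ∀ (n : Nat) (l l' : List Int), l.length ≤ n → l.Perm l' →
    ∀ t w, pvAltGo l t w = pvAltGo l' t w := by
  intro n
  induction n with
  | zero =>
    intro l l' hlen hp t w
    have hl : l = [] := List.length_eq_zero_iff.1 (Nat.le_zero.1 hlen)
    subst hl
    have hl' : l' = [] := (List.Perm.nil_eq hp).symm
    subst hl'
    rfl
  | succ n ih =>
    intro l l' hlen hp t w
    cases l with
    | nil => rw [← List.Perm.nil_eq hp]
    | cons x xs =>
      cases l' with
      | nil => exact absurd hp.symm.nil_eq (by simp)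
      | cons y ys =>
        have h1 : PySem.List.max? (x :: xs) (fun v => v) = some (xs.foldl max x) :=
          PySem.List.max?_id_cons x xs
        have h2 : PySem.List.max? (y :: ys) (fun v => v) = some (ys.foldl max y) :=
          PySem.List.max?_id_cons y ys
        have hmeq : xs.foldl max x = ys.foldl max y := pv_max_eq hp h1 h2
        have hm1 : xs.foldl max x ∈ (x :: xs) := PySem.List.max?_mem h1
        have hm2 : ys.foldl max y ∈ (y :: ys) := PySem.List.max?_mem h2
        rw [hmeq] at h1 hm1
        rw [pvAltGo, pvAltGo]
        simp only [h1, h2, Option.getD_some,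
          PySem.List.remove?_eq_some_erase _ _ hm1, PySem.List.remove?_eq_some_erase _ _ hm2]
        apply ih
        · have hle := List.length_erase_of_mem hm1
          simp only [List.length_cons] at hle hlen
          omega
        · exact hp.erase _
  
-- folding max over elements all ≤ x gives x
theorem pv_foldl_max (xs : List Int) : ∀ (x : Int), (∀ y ∈ xs, y ≤ x) → xs.foldl max x = x := by
  induction xs with
  | nil => intro x _; rfl
  | cons y ys ih =>
    intro x h
    have : max x y = x := max_eq_left (h y (by simp))
    simp only [List.foldl_cons, this]
    exact ih x (fun z hz => h z (by simp [hz]))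

-- on a descending list the B loop computes t + w * Horner value
theorem pv_altGo_sorted : ∀ (s : List Int), s.Pairwise (fun a b => b ≤ a) →
    ∀ t w, pvAltGo s t w = t + w * pvHorner s := by
  intro s
  induction s with
  | nil => intro _ t w; simp [pvAltGo, pvHorner]
  | cons x xs ih =>
    intro hp t w
    have hx : ∀ y ∈ xs, y ≤ x := (List.pairwise_cons.1 hp).1
    have htail := (List.pairwise_cons.1 hp).2
    have h1 : PySem.List.max? (x :: xs) (fun v => v) = some (xs.foldl max x) :=
      PySem.List.max?_id_cons x xs
    have hfold : xs.foldl max x = x := pv_foldl_max xs x hx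
    rw [pvAltGo]
    simp only [h1, hfold, Option.getD_some, PySem.List.remove?_cons_self]
    rw [ih htail]
    simp [pvHorner]
    ring

-- ===== VERDICT (by name: the statement is the Claim_ definition above) =====
theorem marcsCakewalk_spec : Claim_equal_marcsCakewalk := by
  intro calorie _
  unfold Spec_marcsCakewalk marcsCakewalk marcsCakewalk_alt
  simp only []
  rw [show (fun (s : Int × Int) i => (s.1 + 1, s.2 + 2 ^ s.1.toNat * PySem.List.pyGetD (PySem.List.sorted calorie id true) i 0)) = (fun (s : Int × Int) i => (fun (s : Int × Int) x => (s.1 + 1, s.2 + 2 ^ s.1.toNat * x)) s (PySem.List.pyGetD (PySem.List.sorted calorie id true) i 0)) from rfl]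
  rw [PySem.List.foldl_pyRange_zero_pyGetD' (PySem.List.sorted calorie id true) 0
    (fun (s : Int × Int) x => (s.1 + 1, s.2 + 2 ^ s.1.toNat * x)) ((0 : Int), (0 : Int))]
  have hA := pv_horner (PySem.List.sorted calorie id true) 0 0
  have hperm : calorie.Perm (PySem.List.sorted calorie id true) :=
    (PySem.List.sorted_perm calorie id true).symm
  have hB : pvAltGo calorie 0 1 = pvAltGo (PySem.List.sorted calorie id true) 0 1 :=
    pv_altGo_perm calorie.length _ _ le_rfl hperm 0 1
  have hdesc : (PySem.List.sorted calorie id true).Pairwise (fun a b => b ≤ a) := by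
    simpa using PySem.List.sorted_pairwise_rev calorie id
  rw [hB, pv_altGo_sorted _ hdesc, pv_revfold] at *
  simpa using hA
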